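-- pv_equiv track=rewrite | github.com/NKAmapper/building2osm | city_subdivisions.py | get_municipality
-- ===== SOURCE A (Python) =====
-- from typing import Tuple, List, Iterable, Iterator, Collection, Sequence, TypedDict, Dict, NamedTuple, Literal, Union
--
-- def get_municipality(parameter: str, municipalities: Dict[str, str]):
-- 	if ".geojson" in parameter:
-- 		municipality_id = parameter[10:14]  # e.g. bygninger_0301_Oslo.geojson
-- 		municipality_name = municipalities[municipality_id]
-- 		filename = parameter
--
-- 	else:
-- 		if parameter.isdigit():
-- 			municipality_id = parameter
--
-- 		else:
-- 			duplicate = False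
-- 			found_id = None
-- 			for mun_id, mun_name in municipalities.items():
-- 				if parameter.lower() == mun_name.lower():
-- 					found_id = mun_id
-- 					duplicate = False
-- 					break
-- 				elif parameter.lower() in mun_name.lower():
-- 					if found_id:
-- 						duplicate = True
-- 					else:
-- 						found_id = mun_id
--
-- 			if found_id and not duplicate:
-- 				municipality_id = found_id
-- 			else:
-- 				raise RuntimeError(f'Municipality {parameter} not found, or ambiguous')
--
-- 		municipality_name = municipalities[municipality_id]
-- 		filename = f'bygninger_{municipality_id:4}_{municipality_name}.geojson'
--
-- 	return municipality_id, municipality_name, filename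
-- ===== SOURCE B (Python) =====
-- def get_municipality(parameter, municipalities):
--     if ".geojson" in parameter:
--         municipality_id = parameter[10:14]
--         return municipality_id, municipalities[municipality_id], parameter
--
--     if parameter.isdigit():
--         municipality_id = parameter
--     else:
--         p = parameter.lower()
--         exact = [mun_id for mun_id, mun_name in municipalities.items() if p == mun_name.lower()]
--         contains = [mun_id for mun_id, mun_name in municipalities.items() if p in mun_name.lower()]
--         if exact:
--             municipality_id = exact[0]
--         elif len(contains) == 1:
--             municipality_id = contains[0]
--         else:
--             raise RuntimeError(f'Municipality {parameter} not found, or ambiguous')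
--
--     municipality_name = municipalities[municipality_id]
--     return municipality_id, municipality_name, f'bygninger_{municipality_id:4}_{municipality_name}.geojson'
-- ===== Notes on version B (the rewrite author's own statement) =====
-- stated objective: simpler
-- what changed: The stateful scan-with-break carrying found_id/duplicate flags is replaced by two comprehensions collecting the exact and substring matches followed by a plain dispatch (first exact match, else the unique substring match, else raise).
import Mathlib
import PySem

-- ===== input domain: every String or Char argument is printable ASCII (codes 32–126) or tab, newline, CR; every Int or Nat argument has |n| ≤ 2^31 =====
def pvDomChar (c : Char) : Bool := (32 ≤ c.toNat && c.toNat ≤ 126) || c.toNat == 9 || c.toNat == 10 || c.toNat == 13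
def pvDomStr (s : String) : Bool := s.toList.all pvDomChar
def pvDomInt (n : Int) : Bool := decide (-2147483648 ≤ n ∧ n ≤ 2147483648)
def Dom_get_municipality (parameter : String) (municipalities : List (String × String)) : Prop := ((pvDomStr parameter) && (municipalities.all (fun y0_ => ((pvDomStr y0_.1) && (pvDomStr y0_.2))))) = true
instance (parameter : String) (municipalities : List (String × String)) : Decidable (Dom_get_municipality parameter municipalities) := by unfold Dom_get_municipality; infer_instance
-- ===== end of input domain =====

-- B replaces A's stateful scan-with-break (found_id/duplicate flags) by collecting the exact and
-- substring matches in two comprehensions and dispatching on them; same values, objective: simpler.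

-- ===== PORT A =====
-- Python truthiness of found_id (None or '' is falsy)
def pvTruthyId (f : Option String) : Bool :=
  match f with
  | none => false
  | some s => !(s == "")

-- f'{s:4}': a str formatted with width 4 is left-justified, padded on the right with spaces (exact)
def pvFmt4 (s : String) : String :=
  s ++ String.ofList (List.replicate (4 - s.toList.length) ' ')

-- A's 'for mun_id, mun_name in municipalities.items(): …' loop with its break and its two flags
def pvALoop (p : String) : List (String × String) → Option String × Bool → Option String × Bool
  | [], st => st
  | (mun_id, mun_name) :: rest, (found, dup) =>
    let nl := PySem.Str.lower mun_name
    if p == nl then (some mun_id, false)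
    else if PySem.Str.isIn p nl then
      if pvTruthyId found then pvALoop p rest (found, true)
      else pvALoop p rest (some mun_id, dup)
    else pvALoop p rest (found, dup)

def get_municipality (parameter : String) (municipalities : List (String × String)) : String × String × String :=
  let d := PySem.Dict.ofList municipalities
  if PySem.Str.isIn ".geojson" parameter then
    let municipality_id := PySem.Str.slice parameter (some 10) (some 14)
    let municipality_name := (d.get? municipality_id).getD ""   -- KeyError excluded by Pre_
    (municipality_id, municipality_name, parameter)
  else
    let mid? : Option String :=
      if PySem.Str.strIsdigit parameter then some parameter
      else
        match pvALoop (PySem.Str.lower parameter) d.items (none, false) with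
        | (found, dup) => if pvTruthyId found && !dup then found else none   -- none = RuntimeError
    match mid? with
    | none => ("", "", "")   -- RuntimeError, excluded by Pre_
    | some municipality_id =>
      let municipality_name := (d.get? municipality_id).getD ""   -- KeyError excluded by Pre_
      (municipality_id, municipality_name,
        "bygninger_" ++ pvFmt4 municipality_id ++ "_" ++ municipality_name ++ ".geojson")

-- ===== PORT B =====
def get_municipality_alt (parameter : String) (municipalities : List (String × String)) : String × String × String :=
  let d := PySem.Dict.ofList municipalities
  if PySem.Str.isIn ".geojson" parameter then
    let municipality_id := PySem.Str.slice parameter (some 10) (some 14)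
    (municipality_id, (d.get? municipality_id).getD "", parameter)
  else
    let mid? : Option String :=
      if PySem.Str.strIsdigit parameter then some parameter
      else
        let p := PySem.Str.lower parameter
        let exact := (d.items.filter (fun kv => p == PySem.Str.lower kv.2)).map (·.1)
        let contains := (d.items.filter (fun kv => PySem.Str.isIn p (PySem.Str.lower kv.2))).map (·.1)
        match exact with
        | e :: _ => some e
        | [] =>
          match contains with
          | [c] => some c
          | _ => none   -- RuntimeError
    match mid? with
    | none => ("", "", "")   -- RuntimeError, excluded by Pre_
    | some municipality_id =>
      let municipality_name := (d.get? municipality_id).getD ""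
      (municipality_id, municipality_name,
        "bygninger_" ++ pvFmt4 municipality_id ++ "_" ++ municipality_name ++ ".geojson")

-- ===== PRECONDITION & SPEC =====
-- Pre_ excludes the inputs where A raises (missing id key in the .geojson/digit branches; no or
-- ambiguous name match), and dicts containing an empty-string id whose name matches the searched
-- name: there A's truthiness test 'if found_id' on the id string accidentally skips or rejects
-- that match (B either raises or returns that match there).
def Pre_get_municipality (parameter : String) (municipalities : List (String × String)) : Prop :=
  let d := PySem.Dict.ofList municipalities
  if PySem.Str.isIn ".geojson" parameter then
    (d.get? (PySem.Str.slice parameter (some 10) (some 14))).isSome = true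
  else if PySem.Str.strIsdigit parameter then
    (d.get? parameter).isSome = true
  else
    let p := PySem.Str.lower parameter
    (∀ kv ∈ d.items, kv.1 = "" → PySem.Str.isIn p (PySem.Str.lower kv.2) = false) ∧
    (d.items.filter (fun kv => p == PySem.Str.lower kv.2) ≠ [] ∨
     (d.items.filter (fun kv => PySem.Str.isIn p (PySem.Str.lower kv.2))).length = 1)
instance (parameter : String) (municipalities : List (String × String)) : Decidable (Pre_get_municipality parameter municipalities) := by unfold Pre_get_municipality; infer_instance

def pvWitness_get_municipality : String × (List (String × String)) := ("Oslo", [("0301", "Oslo"), ("1103", "Stavanger")])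

def Spec_get_municipality (parameter : String) (municipalities : List (String × String)) (out : String × String × String) : Prop := out = get_municipality_alt parameter municipalities
instance (parameter : String) (municipalities : List (String × String)) (out : String × String × String) : Decidable (Spec_get_municipality parameter municipalities out) := by unfold Spec_get_municipality; infer_instance

-- ===== CLAIM (what is proved, stated in full; the proofs are below) =====
def Claim_equal_get_municipality : Prop := ∀ (parameter : String) (municipalities : List (String × String)), Dom_get_municipality parameter municipalities → Pre_get_municipality parameter municipalities → Spec_get_municipality parameter municipalities (get_municipality parameter municipalities)

-- ===== LEMMAS AND PROOFS =====

theorem pvALoop_exact (p : String) (items : List (String × String)) (e : String × String)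
    (rest : List (String × String)) (st : Option String × Bool)
    (h : items.filter (fun kv => p == PySem.Str.lower kv.2) = e :: rest) :
    pvALoop p items st = (some e.1, false) := by
  induction items generalizing st with
  | nil => simp at h
  | cons kv tl ih =>
    obtain ⟨i, n⟩ := kv
    obtain ⟨f, d⟩ := st
    by_cases hx : p == PySem.Str.lower n
    · simp [List.filter, hx] at h
      simp [pvALoop, hx, ← h.1]
    · have h' : tl.filter (fun kv => p == PySem.Str.lower kv.2) = e :: rest := by
        simpa [List.filter, hx] using h
      by_cases hc : PySem.Str.isIn p (PySem.Str.lower n)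
      · by_cases ht : pvTruthyId f <;> simp [pvALoop, hx, ht, ih _ h']
      · simp [pvALoop, hx, ih _ h']

theorem pvALoop_no_exact_some (p : String) (items : List (String × String))
    (hE : items.filter (fun kv => p == PySem.Str.lower kv.2) = [])
    (s : String) (hs : s ≠ "") (d : Bool) :
    pvALoop p items (some s, d) =
      (some s, d || !(items.filter (fun kv => PySem.Str.isIn p (PySem.Str.lower kv.2))).isEmpty) := by
  induction items generalizing d with
  | nil => simp [pvALoop]
  | cons kv tl ih =>
    obtain ⟨i, n⟩ := kv
    have hx : (p == PySem.Str.lower n) = false := by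
      by_contra hx'
      simp [List.filter, eq_true_of_ne_false hx'] at hE
    have hE' : tl.filter (fun kv => p == PySem.Str.lower kv.2) = [] := by
      simpa [List.filter, hx] using hE
    have ht : pvTruthyId (some s) = true := by simp [pvTruthyId, hs]
    by_cases hc : PySem.Chars.isIn p.toList (PySem.Chars.lower n.toList)
    · simp [pvALoop, hx, hc, ht, List.filter, ih hE']
    · simp [pvALoop, hx, hc, List.filter, ih hE' d]

theorem pvALoop_no_exact_none (p : String) (items : List (String × String))
    (hE : items.filter (fun kv => p == PySem.Str.lower kv.2) = [])
    (hNE : ∀ kv ∈ items, kv.1 = "" → PySem.Str.isIn p (PySem.Str.lower kv.2) = false) :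
    pvALoop p items (none, false) =
      (match items.filter (fun kv => PySem.Str.isIn p (PySem.Str.lower kv.2)) with
       | [] => (none, false)
       | c :: rest => (some c.1, !rest.isEmpty)) := by
  induction items with
  | nil => simp [pvALoop]
  | cons kv tl ih =>
    obtain ⟨i, n⟩ := kv
    have hx : (p == PySem.Str.lower n) = false := by
      by_contra hx'
      simp [List.filter, eq_true_of_ne_false hx'] at hE
    have hE' : tl.filter (fun kv => p == PySem.Str.lower kv.2) = [] := by
      simpa [List.filter, hx] using hE
    have hNE' : ∀ kv ∈ tl, kv.1 = "" → PySem.Str.isIn p (PySem.Str.lower kv.2) = false := by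
      intro kv hkv; exact hNE kv (List.mem_cons_of_mem _ hkv)
    by_cases hc : PySem.Chars.isIn p.toList (PySem.Chars.lower n.toList)
    · have hi : i ≠ "" := by
        intro h0
        have := hNE (i, n) (List.mem_cons_self) h0
        simp [hc] at this
      simp [pvALoop, pvTruthyId, hx, hc, List.filter, pvALoop_no_exact_some p tl hE' i hi false]
    · simp [pvALoop, hx, hc, List.filter, ih hE' hNE']

-- an exact match is also a substring match ('x in x' is true)
theorem pv_exact_isIn (p n : String) (h : p == PySem.Str.lower n) :
    PySem.Str.isIn p (PySem.Str.lower n) = true := by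
  have : p = PySem.Str.lower n := by simpa using h
  subst this
  simp
  exact (PySem.Chars.isIn_iff_infix _ _).mpr (List.infix_refl _)

-- ===== VERDICT (by name: the statement is the Claim_ definition above) =====
theorem get_municipality_spec : Claim_equal_get_municipality := by
  intro parameter municipalities _ hPre
  unfold Spec_get_municipality
  unfold get_municipality get_municipality_alt
  unfold Pre_get_municipality at hPre
  set d := PySem.Dict.ofList municipalities with hd
  by_cases hg : PySem.Str.isIn ".geojson" parameter
  · simp only [hg]; simp
  · simp only [hg, Bool.false_eq_true, if_false] at hPre ⊢
    by_cases hdig : PySem.Str.strIsdigit parameter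
    · simp only [hdig]; simp
    · simp only [hdig, Bool.false_eq_true, if_false] at hPre ⊢
      set p := PySem.Str.lower parameter with hp
      obtain ⟨hNE, hOK⟩ := hPre
      rcases hEx : d.items.filter (fun kv => p == PySem.Str.lower kv.2) with _ | ⟨e, rest⟩
      · -- no exact match: Pre_ forces exactly one substring match
        rcases hOK with hne | hone
        · exact absurd hEx hne
        · rcases hC : d.items.filter (fun kv => PySem.Str.isIn p (PySem.Str.lower kv.2)) with _ | ⟨c, crest⟩
          · rw [hC] at hone; simp at hone
          · rcases crest with _ | ⟨c2, crest2⟩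
            · have hc1 : c.1 ≠ "" := by
                intro h0
                have hcmem : c ∈ d.items.filter (fun kv => PySem.Str.isIn p (PySem.Str.lower kv.2)) := by
                  rw [hC]; exact List.mem_cons_self
                have := List.of_mem_filter hcmem
                have := hNE c (List.mem_of_mem_filter hcmem) h0
                simp_all
              rw [pvALoop_no_exact_none p d.items hEx hNE, hC, hEx]
              simp [pvTruthyId, hc1]
            · rw [hC] at hone; simp at hone
      · -- an exact match exists: both take the first one
        have he1 : e.1 ≠ "" := by
          intro h0
          have hemem : e ∈ d.items.filter (fun kv => p == PySem.Str.lower kv.2) := by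
            rw [hEx]; exact List.mem_cons_self
          have hx := List.of_mem_filter hemem
          have := hNE e (List.mem_of_mem_filter hemem) h0
          rw [pv_exact_isIn p e.2 hx] at this
          simp at this
        rw [pvALoop_exact p d.items e rest (none, false) hEx, hEx]
        simp [pvTruthyId, he1]
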